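-- pv_equiv track=rewrite | github.com/thupchnsky/2DDNA | utils/conversion.py | diff_enc
-- ===== SOURCE A (Python) =====
-- def diff_enc(l):
--     # Differential encoding. Add -1 as synchronizing markers
--     result_l = [-1, l[0]]
--     for i in range(1, len(l)):
--         if i % 30 == 0:
--             result_l += [-1, l[i]]
--         else:
--             result_l += [l[i] - l[i-1]]
--     return result_l
-- ===== SOURCE B (Python) =====
-- def diff_enc(l):
--     # Chunked differential encoding: each 30-element chunk starts with a -1
--     # sync marker and its first value, followed by in-chunk differences.
--     result = []
--     for k in range(0, len(l), 30):
--         c = l[k:k + 30]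
--         result += [-1, c[0]]
--         result += [c[j] - c[j - 1] for j in range(1, len(c))]
--     return result
-- ===== Notes on version B (the rewrite author's own statement) =====
-- stated objective: alternative
-- what changed: Replaces the single index-modulo linear pass with a two-level traversal: slice the list into 30-element chunks and emit [-1, first] plus the in-chunk differences for each chunk.
import Mathlib
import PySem

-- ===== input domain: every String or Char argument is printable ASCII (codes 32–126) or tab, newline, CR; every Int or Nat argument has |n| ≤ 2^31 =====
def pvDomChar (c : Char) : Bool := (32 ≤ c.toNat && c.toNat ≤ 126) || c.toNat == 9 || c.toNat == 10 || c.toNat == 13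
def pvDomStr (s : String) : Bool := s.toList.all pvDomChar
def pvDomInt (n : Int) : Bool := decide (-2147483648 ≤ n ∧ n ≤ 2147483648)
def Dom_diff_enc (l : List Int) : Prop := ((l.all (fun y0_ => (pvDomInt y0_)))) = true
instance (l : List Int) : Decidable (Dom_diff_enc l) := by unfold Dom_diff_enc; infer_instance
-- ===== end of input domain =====

-- B re-implements the single index-modulo pass as a two-level traversal over 30-element
-- chunks (slice per chunk, then in-chunk diffs); objective: alternative decomposition.

-- ===== PORT A =====
-- single linear pass over indices 1..len-1, marker [-1, l[i]] whenever i % 30 == 0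
def diff_enc (l : List Int) : List Int :=
  (PySem.List.pyRange 1 (l.length : Int) 1).foldl
    (fun result_l i =>
      if PySem.Int.mod i 30 = 0 then
        result_l ++ [-1, PySem.List.pyGetD l i 0]
      else
        result_l ++ [PySem.List.pyGetD l i 0 - PySem.List.pyGetD l (i - 1) 0])
    [-1, PySem.List.pyGetD l 0 0]

-- ===== PORT B =====
-- encoding of one chunk c: [-1, c[0]] followed by the in-chunk differences
def pvEncChunk (c : List Int) : List Int :=
  [-1, PySem.List.pyGetD c 0 0] ++
    (PySem.List.pyRange 1 (c.length : Int) 1).map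
      (fun j => PySem.List.pyGetD c j 0 - PySem.List.pyGetD c (j - 1) 0)

def diff_enc_alt (l : List Int) : List Int :=
  (PySem.List.pyRange 0 (l.length : Int) 30).foldl
    (fun result k => result ++ pvEncChunk (PySem.List.slice l (some k) (some (k + 30))))
    []

-- ===== PRECONDITION & SPEC =====
-- Pre_ excludes only the empty list, on which A raises IndexError (it reads l[0]).
def Pre_diff_enc (l : List Int) : Prop := l ≠ []
instance (l : List Int) : Decidable (Pre_diff_enc l) := by unfold Pre_diff_enc; infer_instance
def pvWitness_diff_enc : List Int := [5, -3, 7, 7]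

def Spec_diff_enc (l : List Int) (out : List Int) : Prop := out = diff_enc_alt l
instance (l : List Int) (out : List Int) : Decidable (Spec_diff_enc l out) := by unfold Spec_diff_enc; infer_instance

-- ===== CLAIM (what is proved, stated in full; the proofs are below) =====
def Claim_equal_diff_enc : Prop := ∀ (l : List Int), Dom_diff_enc l → Pre_diff_enc l → Spec_diff_enc l (diff_enc l)

-- ===== LEMMAS AND PROOFS =====

-- common recursive form: encode the first 30-element chunk, recurse on the rest
def pvEncRec (l : List Int) : List Int :=
  if _h : l = [] then []
  else pvEncChunk (l.take 30) ++ pvEncRec (l.drop 30)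
termination_by l.length
decreasing_by
  have : 0 < l.length := List.length_pos_iff.mpr _h
  simp only [List.length_drop]
  omega

-- A's per-index contribution (the two branches of A's loop body as a list)
def pvGA (l : List Int) (i : Int) : List Int :=
  if PySem.Int.mod i 30 = 0 then [-1, PySem.List.pyGetD l i 0]
  else [PySem.List.pyGetD l i 0 - PySem.List.pyGetD l (i - 1) 0]

theorem pvFlatMapA (l : List Int) :
    diff_enc l = [-1, PySem.List.pyGetD l 0 0] ++
      (PySem.List.pyRange 1 (l.length : Int) 1).flatMap (pvGA l) := by
  unfold diff_enc
  rw [PySem.List.foldl_congr_mem _ _ (fun r i => r ++ pvGA l i) _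
      (by intro acc x _; simp only [pvGA]; split <;> rfl)]
  exact PySem.List.foldl_append_eq_flatMap _ _ _

theorem pvFlatMapB (l : List Int) :
    diff_enc_alt l = (PySem.List.pyRange 0 (l.length : Int) 30).flatMap
      (fun k => pvEncChunk (PySem.List.slice l (some k) (some (k + 30)))) := by
  unfold diff_enc_alt
  exact PySem.List.foldl_append_eq_flatMap _ _ _

theorem pvGet_shift (l : List Int) (j : Int) (hj : 0 ≤ j) :
    PySem.List.pyGetD l (30 + j) 0 = PySem.List.pyGetD (l.drop 30) j 0 := by
  rw [PySem.List.pyGetD_of_nonneg _ _ (by omega), PySem.List.pyGetD_of_nonneg _ _ hj]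
  have h30 : (30 + j).toNat = 30 + j.toNat := by omega
  simp [List.getD_eq_getElem?_getD, List.getElem?_drop, h30]

theorem pvMod30_shift (i : Int) : PySem.Int.mod (30 + i) 30 = PySem.Int.mod i 30 := by
  rw [PySem.Int.mod_eq_emod_of_pos (by norm_num : (0:Int) < 30),
      PySem.Int.mod_eq_emod_of_pos (by norm_num : (0:Int) < 30)]
  omega

theorem pvGA_shift (l : List Int) (k : Nat) :
    pvGA l (31 + (k : Int)) = pvGA (l.drop 30) (1 + (k : Int)) := by
  rw [show (31 : Int) + k = 30 + (1 + k) by ring]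
  unfold pvGA
  rw [pvMod30_shift (1 + (k : Int))]
  rw [show (30 : Int) + (1 + k) - 1 = 30 + k by ring]
  rw [pvGet_shift l (1 + k) (by omega), pvGet_shift l k (by omega)]
  rw [show (1 : Int) + k - 1 = k by ring]

-- in-chunk diffs of a ≤30-element prefix read the original list
theorem pvGet_take (l : List Int) (j : Int) (hj : 0 ≤ j) (hlt : j < 30) :
    PySem.List.pyGetD (l.take 30) j 0 = PySem.List.pyGetD l j 0 := by
  rw [PySem.List.pyGetD_of_nonneg _ _ hj, PySem.List.pyGetD_of_nonneg _ _ hj]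
  simp [List.getD_eq_getElem?_getD, List.getElem?_take]
  split
  · rfl
  · exfalso; omega

theorem pvMod_small_ne (i : Int) (h1 : 1 ≤ i) (h2 : i < 30) : PySem.Int.mod i 30 ≠ 0 := by
  rw [PySem.Int.mod_eq_emod_of_pos (by norm_num : (0:Int) < 30)]
  omega

theorem pvChunk_shift (l : List Int) (k : Nat) :
    PySem.List.slice l (some (30 + 30 * (k : Int))) (some (30 + 30 * (k : Int) + 30)) =
      PySem.List.slice (l.drop 30) (some (30 * (k : Int))) (some (30 * (k : Int) + 30)) := by
  rw [PySem.List.slice_toNat _ (by positivity) (by positivity),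
      PySem.List.slice_toNat _ (by positivity) (by positivity)]
  have e1 : ((30 : Int) + 30 * k).toNat = 30 + 30 * k := by omega
  have e2 : ((30 : Int) + 30 * k + 30).toNat = 30 + 30 * k + 30 := by omega
  have e3 : ((30 : Int) * k).toNat = 30 * k := by omega
  have e4 : ((30 : Int) * k + 30).toNat = 30 * k + 30 := by omega
  rw [e1, e2, e3, e4, List.drop_drop]
  congr 1
  omega

-- B as a flatMap over chunk numbers 0, 1, …, ⌈n/30⌉-1
theorem pvFlatMapB' (xs : List Int) :
    diff_enc_alt xs = (List.range (((xs.length : Int) + 29) / 30).toNat).flatMap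
      (fun (k : Nat) => pvEncChunk (PySem.List.slice xs (some (30 * (k : Int))) (some (30 * (k : Int) + 30)))) := by
  rw [pvFlatMapB, PySem.List.pyRange_of_pos 0 _ (by norm_num : (0:Int) < 30)]
  by_cases h : (0 : Int) < (xs.length : Int)
  · rw [if_pos h, List.flatMap_map]
    have hc : (((xs.length : Int) - 0 + 30 - 1) / 30).toNat = (((xs.length : Int) + 29) / 30).toNat := by
      omega
    rw [hc]
    apply List.flatMap_congr
    intro k _
    norm_num
  · have h0 : xs.length = 0 := by omega
    rw [if_neg h, h0]
    norm_num

-- the chunk count of l is one more than the chunk count of l.drop 30 (l nonempty)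
theorem pvCount_succ (l : List Int) (h : l ≠ []) :
    (((l.length : Int) + 29) / 30).toNat = ((((l.drop 30).length : Int) + 29) / 30).toNat + 1 := by
  have hn : 0 < l.length := List.length_pos_iff.mpr h
  simp only [List.length_drop]
  omega

theorem pvFirstChunk (l : List Int) :
    PySem.List.slice l none (some (30 : Int)) = l.take 30 := by
  rw [PySem.List.slice_to _ (by norm_num : (0:Int) ≤ 30)]
  rfl

theorem pv_alt_eq_encRec (l : List Int) : diff_enc_alt l = pvEncRec l := by
  by_cases h : l = []
  · subst h
    rw [show diff_enc_alt [] = [] from rfl]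
    simp [pvEncRec]
  · unfold pvEncRec
    rw [dif_neg h, pvFlatMapB' l, pvCount_succ l h, List.range_succ_eq_map,
        List.flatMap_cons, List.flatMap_map]
    congr 1
    · norm_num [pvFirstChunk]
    · rw [← pv_alt_eq_encRec (l.drop 30), pvFlatMapB' (l.drop 30)]
      apply List.flatMap_congr
      intro k _
      have hc : (30 : Int) * ((Nat.succ k : Nat) : Int) = 30 + 30 * (k : Int) := by push_cast; ring
      rw [hc, pvChunk_shift l k]
termination_by l.length
decreasing_by
  have : 0 < l.length := List.length_pos_iff.mpr h
  simp only [List.length_drop]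
  omega

theorem pv_a_eq_encRec (l : List Int) (h : l ≠ []) : diff_enc l = pvEncRec l := by
  have hn : 0 < l.length := List.length_pos_iff.mpr h
  unfold pvEncRec
  rw [dif_neg h, pvFlatMapA l]
  by_cases h30 : l.length ≤ 30
  · -- one chunk: no index 1 ≤ i < 30 triggers the marker branch
    have hdrop : l.drop 30 = [] := List.drop_eq_nil_of_le h30
    have htake : l.take 30 = l := List.take_of_length_le h30
    rw [hdrop, htake]
    have hcong : (PySem.List.pyRange 1 (l.length : Int) 1).flatMap (pvGA l) =
        (PySem.List.pyRange 1 (l.length : Int) 1).flatMap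
          (fun i => [PySem.List.pyGetD l i 0 - PySem.List.pyGetD l (i - 1) 0]) := by
      apply List.flatMap_congr
      intro i hi
      rw [PySem.List.mem_pyRange_one] at hi
      unfold pvGA
      rw [if_neg (pvMod_small_ne i hi.1 (by omega))]
    rw [hcong, ← List.map_eq_flatMap]
    simp [pvEncChunk, pvEncRec]
  · -- more than one chunk: split the index range at 30
    rw [not_le] at h30
    rw [PySem.List.pyRange_one_append 1 30 (l.length : Int) (by norm_num) (by exact_mod_cast h30.le),
        List.flatMap_append]
    have hpart1 : (PySem.List.pyRange 1 (30 : Int) 1).flatMap (pvGA l) =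
        (PySem.List.pyRange 1 ((l.take 30).length : Int) 1).map
          (fun j => PySem.List.pyGetD (l.take 30) j 0 - PySem.List.pyGetD (l.take 30) (j - 1) 0) := by
      have hlen : (l.take 30).length = 30 := by simp; omega
      rw [hlen]
      have : (PySem.List.pyRange 1 (30 : Int) 1).flatMap (pvGA l) =
          (PySem.List.pyRange 1 (30 : Int) 1).flatMap
            (fun j => [PySem.List.pyGetD (l.take 30) j 0 - PySem.List.pyGetD (l.take 30) (j - 1) 0]) := by
        apply List.flatMap_congr
        intro i hi
        rw [PySem.List.mem_pyRange_one] at hi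
        unfold pvGA
        rw [if_neg (pvMod_small_ne i hi.1 hi.2), pvGet_take l i (by omega) hi.2,
            pvGet_take l (i - 1) (by omega) (by omega)]
      rw [this, ← List.map_eq_flatMap]
      norm_num
    have hpart2 : (PySem.List.pyRange (30 : Int) (l.length : Int) 1).flatMap (pvGA l) =
        pvEncRec (l.drop 30) := by
      rw [PySem.List.pyRange_one_cons (by exact_mod_cast h30), List.flatMap_cons]
      have hdne : l.drop 30 ≠ [] := by
        intro hc
        have := congrArg List.length hc
        simp at this
        omega
      rw [← pv_a_eq_encRec (l.drop 30) hdne, pvFlatMapA (l.drop 30)]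
      have hga30 : pvGA l 30 = [-1, PySem.List.pyGetD (l.drop 30) 0 0] := by
        unfold pvGA
        rw [if_pos (by rw [PySem.Int.mod_eq_emod_of_pos (by norm_num : (0:Int) < 30)]; norm_num)]
        rw [show (30 : Int) = 30 + 0 by ring, pvGet_shift l 0 le_rfl]
      rw [hga30]
      have hshift : (PySem.List.pyRange (30 + 1) (l.length : Int) 1).flatMap (pvGA l) =
          (PySem.List.pyRange 1 (((l.drop 30).length : Int)) 1).flatMap (pvGA (l.drop 30)) := by
        rw [PySem.List.pyRange_one, PySem.List.pyRange_one, List.flatMap_map, List.flatMap_map]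
        have hlen : ((l.length : Int) - (30 + 1)).toNat = (((l.drop 30).length : Int) - 1).toNat := by
          simp only [List.length_drop]
          omega
        rw [hlen]
        apply List.flatMap_congr
        intro k _
        have e1 : (30 : Int) + 1 + (k : Int) = 31 + (k : Int) := by ring
        rw [e1, pvGA_shift l k]
      rw [hshift]
    rw [hpart1, hpart2]
    unfold pvEncChunk
    rw [pvGet_take l 0 le_rfl (by norm_num)]
    simp

-- ===== VERDICT (by name: the statement is the Claim_ definition above) =====
theorem diff_enc_spec : Claim_equal_diff_enc := by
  intro l _ hpre
  unfold Spec_diff_enc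
  rw [pv_alt_eq_encRec, pv_a_eq_encRec l hpre]
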